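-- pv_equiv track=rewrite | github.com/Tetragonal/kattis-solutions | solved/6-7/piecesofparentheses.py | parse
-- ===== SOURCE A (Python) =====
-- def parse(s):
--     maxneg = 0
--     maxnegi = 0
--     count = 0
--     for i, c in enumerate(s):
--         if c == '(':
--             count += 1
--         else:
--             count -= 1
--             if count <= maxneg:
--                 maxneg = count
--                 maxnegi = i
--     poscount = 0
--     for c in s[maxnegi+1:]:
--         if c == '(': poscount += 1
--         else: poscount -= 1
--     return maxneg, count, len(s), s, poscount
-- ===== SOURCE B (Python) =====
-- def parse(s):
--     bals = []
--     count = 0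
--     for c in s:
--         count += 1 if c == '(' else -1
--         bals.append(count)
--     maxneg = min([0] + bals)
--     maxnegi = 0
--     for i, v in enumerate(bals):
--         if v == maxneg:
--             maxnegi = i
--     poscount = count - bals[maxnegi] if s else 0
--     return maxneg, count, len(s), s, poscount
-- ===== Notes on version B (the rewrite author's own statement) =====
-- stated objective: alternative
-- what changed: A tracks the running minimum and its last index online in one stateful loop and then re-scans the suffix; B first materialises the table of running balances in one pass, then reads off the minimum with min(), the last index achieving it with an enumerate scan, and computes the suffix sum arithmetically as count - bals[maxnegi] instead of a second character loop.
import Mathlib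
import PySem

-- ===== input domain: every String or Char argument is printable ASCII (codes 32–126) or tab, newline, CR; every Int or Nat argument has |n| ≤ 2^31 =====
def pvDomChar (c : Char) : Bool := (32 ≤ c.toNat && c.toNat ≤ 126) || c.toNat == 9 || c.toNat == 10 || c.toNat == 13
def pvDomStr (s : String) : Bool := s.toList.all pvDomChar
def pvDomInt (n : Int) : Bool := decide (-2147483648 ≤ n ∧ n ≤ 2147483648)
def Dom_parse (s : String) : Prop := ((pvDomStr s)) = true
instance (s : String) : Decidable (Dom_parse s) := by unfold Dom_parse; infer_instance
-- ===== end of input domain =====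

-- B replaces A's online min/last-index tracking by a balance table built in one pass,
-- then derives the min, its last index and the suffix sum from the table (objective: alternative).

-- ===== PORT A =====
-- the body of A's main for-loop, state (maxneg, maxnegi, count)
def parseStep (st : Int × Int × Int) (ic : Int × Char) : Int × Int × Int :=
  if ic.2 = '(' then (st.1, st.2.1, st.2.2 + 1)
  else if st.2.2 - 1 ≤ st.1 then (st.2.2 - 1, ic.1, st.2.2 - 1)
  else (st.1, st.2.1, st.2.2 - 1)

def parse (s : String) : Int × Int × Int × String × Int :=
  let st := (PySem.List.enumerate s.toList 0).foldl parseStep (0, 0, 0)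
  let maxneg := st.1; let maxnegi := st.2.1; let count := st.2.2
  -- s[maxnegi+1:]
  let tl := PySem.List.slice s.toList (some (maxnegi + 1)) none
  let poscount := tl.foldl (fun acc c => if c = '(' then acc + 1 else acc - 1) 0
  (maxneg, count, PySem.Str.len s, s, poscount)

-- ===== PORT B =====
-- the body of B's table-building loop: append the running balance
def parseAltBuild (p : List Int × Int) (c : Char) : List Int × Int :=
  let cnt := p.2 + (if c = '(' then 1 else -1)
  (p.1 ++ [cnt], cnt)

-- the body of B's last-index scan over enumerate(bals)
def parseAltScan (maxneg : Int) (a : Int) (iv : Int × Int) : Int :=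
  if iv.2 = maxneg then iv.1 else a

def parse_alt (s : String) : Int × Int × Int × String × Int :=
  let bc := s.toList.foldl parseAltBuild ([], 0)
  let bals := bc.1; let count := bc.2
  let maxneg := (PySem.List.min? ((0 : Int) :: bals) (fun y => y)).getD 0
  let maxnegi := (PySem.List.enumerate bals 0).foldl (parseAltScan maxneg) (0 : Int)
  let poscount := if s.toList ≠ [] then count - PySem.List.pyGetD bals maxnegi 0 else 0
  (maxneg, count, PySem.Str.len s, s, poscount)

-- ===== PRECONDITION & SPEC =====
def Spec_parse (s : String) (out : Int × Int × Int × String × Int) : Prop := out = parse_alt s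
instance (s : String) (out : Int × Int × Int × String × Int) : Decidable (Spec_parse s out) := by unfold Spec_parse; infer_instance

-- ===== CLAIM (what is proved, stated in full; the proofs are below) =====
def Claim_equal_parse : Prop := ∀ (s : String), Dom_parse s → Spec_parse s (parse s)

-- ===== LEMMAS AND PROOFS =====

-- per-character balance delta
def pvD (c : Char) : Int := if c = '(' then 1 else -1

-- list of running balances of cs starting from a (B's `bals` table)
def pvBalList : List Char → Int → List Int
  | [], _ => []
  | c :: cs, a => (a + pvD c) :: pvBalList cs (a + pvD c)

-- final balance of cs starting from a
def pvBalLast (cs : List Char) (a : Int) : Int := cs.foldl (fun x c => x + pvD c) a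

-- last index (counting from i0) whose value is M, default a
def pvLastIdx : List Int → Int → Int → Int → Int
  | [], _, a, _ => a
  | v :: vs, i0, a, M => pvLastIdx vs (i0 + 1) (if v = M then i0 else a) M

theorem pvFoldlMin_le_init (l : List Int) (a : Int) : l.foldl min a ≤ a := by
  induction l generalizing a with
  | nil => simp
  | cons v l ih => exact le_trans (ih (min a v)) (min_le_left a v)

theorem pvFoldlMin_mem_or_eq (l : List Int) (a : Int) : l.foldl min a = a ∨ l.foldl min a ∈ l := by
  induction l generalizing a with
  | nil => left; rfl
  | cons v l ih =>
    rcases ih (min a v) with h | h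
    · rcases le_total a v with hle | hle
      · left; simpa [List.foldl_cons, min_eq_left hle] using h
      · right; simp only [List.foldl_cons] at h ⊢
        rw [h, min_eq_right hle]; exact List.mem_cons_self
    · right; exact List.mem_cons_of_mem v h

theorem pvLastIdx_irrel (vs : List Int) : ∀ (i0 a b M : Int), M ∈ vs →
    pvLastIdx vs i0 a M = pvLastIdx vs i0 b M := by
  induction vs with
  | nil => intro _ _ _ _ h; cases h
  | cons v vs ih =>
    intro i0 a b M hm
    by_cases hv : v = M
    · simp [pvLastIdx, hv]
    · have hmem : M ∈ vs := by
        rcases List.mem_cons.mp hm with h | h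
        · exact absurd h.symm hv
        · exact h
      simp only [pvLastIdx, if_neg hv]
      exact ih _ _ _ _ hmem

theorem pvLastIdx_bounds (vs : List Int) : ∀ (i0 a M N : Int), 0 ≤ a → a < N → 0 ≤ i0 →
    i0 + (vs.length : Int) ≤ N → 0 ≤ pvLastIdx vs i0 a M ∧ pvLastIdx vs i0 a M < N := by
  induction vs with
  | nil => intro i0 a M N h1 h2 _ _; exact ⟨h1, h2⟩
  | cons v vs ih =>
    intro i0 a M N h1 h2 h3 h4
    simp only [List.length_cons, Nat.cast_add, Nat.cast_one] at h4
    simp only [pvLastIdx]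
    by_cases hv : v = M
    · rw [if_pos hv]; exact ih (i0 + 1) i0 M N h3 (by omega) (by omega) (by omega)
    · rw [if_neg hv]; exact ih (i0 + 1) a M N h1 h2 (by omega) (by omega)

theorem pvBalList_length (cs : List Char) : ∀ a : Int, (pvBalList cs a).length = cs.length := by
  induction cs with
  | nil => intro a; rfl
  | cons c cs ih => intro a; simp [pvBalList, ih]

theorem pvBalLast_shift (l : List Char) : ∀ (x y : Int), pvBalLast l (x + y) = x + pvBalLast l y := by
  induction l with
  | nil => intro x y; rfl
  | cons c l ih =>
    intro x y
    simp only [pvBalLast, List.foldl_cons] at *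
    rw [add_assoc, ih]

theorem pvDrop_balLast (cs : List Char) : ∀ (k : Nat) (a : Int), k < cs.length →
    pvBalLast (cs.drop (k + 1)) ((pvBalList cs a).getD k 0) = pvBalLast cs a := by
  induction cs with
  | nil => intro k a h; cases h
  | cons c cs ih =>
    intro k a h
    cases k with
    | zero => simp [pvBalList, pvBalLast]
    | succ k =>
      simp only [List.drop_succ_cons, pvBalList, List.getD_cons_succ]
      have := ih k (a + pvD c) (by simpa using Nat.lt_of_succ_lt_succ h)
      simpa [pvBalLast] using this

-- A's poscount loop is the balance fold
theorem pvFoldA_eq_balLast (l : List Char) : ∀ a : Int,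
    l.foldl (fun acc c => if c = '(' then acc + 1 else acc - 1) a = pvBalLast l a := by
  induction l with
  | nil => intro a; rfl
  | cons c l ih =>
    intro a
    simp only [pvBalLast, List.foldl_cons] at ih ⊢
    have h : (if c = '(' then a + 1 else a - 1) = a + pvD c := by
      by_cases hc : c = '(' <;> simp [pvD, hc, sub_eq_add_neg]
    rw [h]
    exact ih (a + pvD c)

-- A's main loop characterised by the balance table
theorem pvAfold (cs : List Char) : ∀ (i0 mn mi cnt : Int), mn ≤ cnt →
    (PySem.List.enumerate cs i0).foldl parseStep (mn, mi, cnt)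
    = ((pvBalList cs cnt).foldl min mn,
       pvLastIdx (pvBalList cs cnt) i0 mi ((pvBalList cs cnt).foldl min mn),
       pvBalLast cs cnt) := by
  induction cs with
  | nil => intro i0 mn mi cnt _; simp [PySem.List.enumerate, pvBalList, pvBalLast, pvLastIdx]
  | cons c cs ih =>
    intro i0 mn mi cnt hmn
    rw [PySem.List.enumerate_cons, List.foldl_cons]
    by_cases hc : c = '('
    · have hstep : parseStep (mn, mi, cnt) (i0, c) = (mn, mi, cnt + 1) := by
        simp [parseStep, hc]
      have hd : pvD c = 1 := by simp [pvD, hc]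
      rw [hstep, ih (i0 + 1) mn mi (cnt + 1) (by omega)]
      simp only [pvBalList, hd, pvBalLast, List.foldl_cons, pvLastIdx]
      rw [min_eq_left (by omega : mn ≤ cnt + 1)]
      have hne2 : ¬ (cnt + 1 = List.foldl min mn (pvBalList cs (cnt + 1))) := by
        have := pvFoldlMin_le_init (pvBalList cs (cnt + 1)) mn; omega
      rw [if_neg hne2]
    · have hd : pvD c = -1 := by simp [pvD, hc]
      by_cases h2 : cnt - 1 ≤ mn
      · -- new minimum (or tie): A moves the index to i0
        have hstep : parseStep (mn, mi, cnt) (i0, c) = (cnt - 1, i0, cnt - 1) := by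
          simp [parseStep, hc, h2]
        rw [hstep, ih (i0 + 1) (cnt - 1) i0 (cnt - 1) le_rfl]
        simp only [pvBalList, hd, pvBalLast, List.foldl_cons, pvLastIdx]
        have hc1 : cnt + -1 = cnt - 1 := by ring
        rw [hc1, min_eq_right (by omega : cnt - 1 ≤ mn)]
        by_cases he : cnt - 1 = List.foldl min (cnt - 1) (pvBalList cs (cnt - 1))
        · rw [if_pos he]
        · rw [if_neg he]
          rcases pvFoldlMin_mem_or_eq (pvBalList cs (cnt - 1)) (cnt - 1) with h | h
          · exact absurd h.symm he
          · rw [pvLastIdx_irrel (pvBalList cs (cnt - 1)) (i0 + 1) mi i0 _ h]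
      · -- balance stays above the current minimum: A's state is unchanged
        have hstep : parseStep (mn, mi, cnt) (i0, c) = (mn, mi, cnt - 1) := by
          simp [parseStep, hc, h2]
        rw [hstep, ih (i0 + 1) mn mi (cnt - 1) (by omega)]
        simp only [pvBalList, hd, pvBalLast, List.foldl_cons, pvLastIdx]
        have hc1 : cnt + -1 = cnt - 1 := by ring
        rw [hc1, min_eq_left (by omega : mn ≤ cnt - 1)]
        have hne2 : ¬ (cnt - 1 = List.foldl min mn (pvBalList cs (cnt - 1))) := by
          have := pvFoldlMin_le_init (pvBalList cs (cnt - 1)) mn; omega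
        rw [if_neg hne2]

-- B's table-building loop
theorem pvBbuild (cs : List Char) : ∀ (acc : List Int) (a : Int),
    cs.foldl parseAltBuild (acc, a) = (acc ++ pvBalList cs a, pvBalLast cs a) := by
  induction cs with
  | nil => intro acc a; simp [pvBalList, pvBalLast]
  | cons c cs ih =>
    intro acc a
    simp only [List.foldl_cons, parseAltBuild]
    rw [ih]
    have hd : a + (if c = '(' then 1 else -1) = a + pvD c := by rfl
    simp [pvBalList, pvBalLast, hd, List.append_assoc]

-- B's last-index scan
theorem pvBscan (vs : List Int) : ∀ (i0 a M : Int),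
    (PySem.List.enumerate vs i0).foldl (parseAltScan M) a = pvLastIdx vs i0 a M := by
  induction vs with
  | nil => intro i0 a M; simp [PySem.List.enumerate, pvLastIdx]
  | cons v vs ih =>
    intro i0 a M
    rw [PySem.List.enumerate_cons, List.foldl_cons]
    simp only [parseAltScan, pvLastIdx]
    exact ih (i0 + 1) _ M

theorem pvParse_eq (s : String) : parse s = parse_alt s := by
  unfold parse parse_alt
  rw [pvAfold s.toList 0 0 0 0 le_rfl, pvBbuild s.toList [] 0]
  simp only []
  rw [List.nil_append, PySem.List.min?_id_cons, Option.getD_some, pvBscan]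
  simp only [Prod.mk.injEq]
  refine ⟨trivial, trivial, trivial, trivial, ?_⟩
  rcases eq_or_ne s.toList [] with hnil | hne
  · rw [hnil]
    rw [if_neg (by simp)]
    rw [PySem.List.slice_from ([] : List Char) (by decide : (0:Int) ≤ pvLastIdx (pvBalList [] 0) 0 0 (List.foldl min 0 (pvBalList [] 0)) + 1)]
    simp
  · rw [if_pos hne]
    set bals := pvBalList s.toList 0 with hbals
    set M := bals.foldl min 0 with hM
    set mi := pvLastIdx bals 0 0 M with hmi
    have hlen : 0 < s.toList.length := List.length_pos_iff.mpr hne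
    have hblen : (bals.length : Int) = (s.toList.length : Int) := by
      rw [hbals]; exact_mod_cast pvBalList_length s.toList 0
    obtain ⟨hmi0, hmilt⟩ := pvLastIdx_bounds bals 0 0 M (s.toList.length : Int) le_rfl
      (by exact_mod_cast hlen) le_rfl (by omega)
    rw [PySem.List.slice_from s.toList (by omega : (0:Int) ≤ mi + 1), pvFoldA_eq_balLast]
    have htn : (mi + 1).toNat = mi.toNat + 1 := by omega
    have hklt : mi.toNat < s.toList.length := by omega
    have hkey := pvDrop_balLast s.toList mi.toNat 0 hklt
    have hget : PySem.List.pyGetD bals mi 0 = bals.getD mi.toNat 0 := by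
      rw [PySem.List.pyGetD_eq_getElem bals 0 hmi0 (by omega : mi < (bals.length : Int))]
      rw [List.getD_eq_getElem bals 0 (by omega : mi.toNat < bals.length)]
    rw [htn, hget]
    have hshift : pvBalLast (s.toList.drop (mi.toNat + 1)) (bals.getD mi.toNat 0)
        = bals.getD mi.toNat 0 + pvBalLast (s.toList.drop (mi.toNat + 1)) 0 := by
      have := pvBalLast_shift (s.toList.drop (mi.toNat + 1)) (bals.getD mi.toNat 0) 0
      simpa using this
    rw [← hbals] at hkey
    omega

-- ===== VERDICT (by name: the statement is the Claim_ definition above) =====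
theorem parse_spec : Claim_equal_parse := by
  intro s _
  exact pvParse_eq s
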